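-- pv_equiv track=rewrite | github.com/emarich/PROG1 | CV8/book/ex9_7/ex7.py | hasConsecutiveLetters
-- ===== SOURCE A (Python) =====
-- def hasConsecutiveLetters(word):
--     count = 0
--     i = 0
--     while i < len(word) - 1:
--         if (word[i] == word[i+1]):
--             count += 1
--             i += 2
--         else:
--             i += 1
--     if (count == 3):
--         return True
--     else:
--         return False
-- ===== SOURCE B (Python) =====
-- def hasConsecutiveLetters(word):
--     # Split the word into maximal runs of identical characters, then count
--     # floor(L/2) non-overlapping equal pairs inside each run arithmetically.
--     lengths = []
--     run = 0
--     prev = ''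
--     for ch in word:
--         if run > 0 and ch == prev:
--             run += 1
--         else:
--             if run > 0:
--                 lengths.append(run)
--             run = 1
--             prev = ch
--     if run > 0:
--         lengths.append(run)
--     return sum(L // 2 for L in lengths) == 3
-- ===== Notes on version B (the rewrite author's own statement) =====
-- stated objective: alternative
-- what changed: B splits the word into maximal runs of identical characters and sums floor(L/2) over the run lengths instead of A's greedy index scan that skips two positions on each matched pair; it avoids A's per-step len() and double indexing, a constant-factor saving.
import Mathlib
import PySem

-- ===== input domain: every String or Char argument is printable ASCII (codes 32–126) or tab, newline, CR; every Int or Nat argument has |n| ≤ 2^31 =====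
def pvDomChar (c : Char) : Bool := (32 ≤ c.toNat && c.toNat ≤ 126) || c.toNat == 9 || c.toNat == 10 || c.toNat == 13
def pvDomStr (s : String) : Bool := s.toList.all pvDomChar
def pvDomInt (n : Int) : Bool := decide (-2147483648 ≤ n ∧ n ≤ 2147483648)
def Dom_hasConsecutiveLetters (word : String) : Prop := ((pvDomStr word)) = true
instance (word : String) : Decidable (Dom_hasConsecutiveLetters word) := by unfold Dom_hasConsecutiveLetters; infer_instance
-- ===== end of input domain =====

-- B replaces A's greedy index scan (skip by 2 on a match) by splitting the word into maximal
-- runs of identical characters and summing floor(L/2) over the run lengths; objective: alternative.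

-- ===== PORT A =====
-- A's while-loop over the index i (advancing by 2 on a match, 1 otherwise) is ported as the
-- obvious structural recursion on the character list carrying the same `count` accumulator.
def pvGoA : List Char → Nat → Nat
  | c :: d :: rest, count => if c = d then pvGoA rest (count + 1) else pvGoA (d :: rest) count
  | _, count => count

def hasConsecutiveLetters (word : String) : Bool :=
  if pvGoA word.toList 0 = 3 then true else false

-- ===== PORT B =====
-- Source B's for-loop building the run-length list, with state (lengths, run, prev)
def pvStepB (st : List Nat × Nat × Char) (ch : Char) : List Nat × Nat × Char :=
  if st.2.1 > 0 ∧ ch = st.2.2 then (st.1, st.2.1 + 1, st.2.2)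
  else ((if st.2.1 > 0 then st.1 ++ [st.2.1] else st.1), 1, ch)

-- Source B's trailing `if run > 0: lengths.append(run)`
def pvFinB (st : List Nat × Nat × Char) : List Nat :=
  if st.2.1 > 0 then st.1 ++ [st.2.1] else st.1

def hasConsecutiveLetters_alt (word : String) : Bool :=
  ((pvFinB (word.toList.foldl pvStepB ([], 0, ' '))).map (· / 2)).sum = 3

-- ===== PRECONDITION & SPEC =====
def Spec_hasConsecutiveLetters (word : String) (out : Bool) : Prop := out = hasConsecutiveLetters_alt word
instance (word : String) (out : Bool) : Decidable (Spec_hasConsecutiveLetters word out) := by unfold Spec_hasConsecutiveLetters; infer_instance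

-- ===== CLAIM (what is proved, stated in full; the proofs are below) =====
def Claim_equal_hasConsecutiveLetters : Prop := ∀ (word : String), Dom_hasConsecutiveLetters word → Spec_hasConsecutiveLetters word (hasConsecutiveLetters word)

-- ===== LEMMAS AND PROOFS =====

-- proof-side helper: the run lengths of `c` seen `n` times followed by the remaining list
def pvRunsGo : Char → Nat → List Char → List Nat
  | _, n, [] => [n]
  | c, n, d :: rest => if d = c then pvRunsGo c (n + 1) rest else n :: pvRunsGo d 1 rest

def pvSumHalves (l : List Nat) : Nat := (l.map (· / 2)).sum

-- the pair count of a word: sum of L/2 over its maximal runs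
def pvS : List Char → Nat
  | [] => 0
  | c :: rest => pvSumHalves (pvRunsGo c 1 rest)

lemma pvSumHalves_runsGo_add_two (rest : List Char) : ∀ (c : Char) (n : Nat),
    pvSumHalves (pvRunsGo c (n + 2) rest) = pvSumHalves (pvRunsGo c n rest) + 1 := by
  induction rest with
  | nil => intro c n; simp [pvRunsGo, pvSumHalves]
  | cons d rest ih =>
      intro c n
      by_cases h : d = c
      · simp only [pvRunsGo, if_pos h]; exact ih c (n + 1)
      · simp only [pvRunsGo, if_neg h, pvSumHalves, List.map, List.sum_cons]
        omega

lemma pvSumHalves_runsGo_zero (rest : List Char) (c : Char) :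
    pvSumHalves (pvRunsGo c 0 rest) = pvS rest := by
  cases rest with
  | nil => simp [pvRunsGo, pvSumHalves, pvS]
  | cons d t =>
      by_cases h : d = c
      · subst h; simp [pvRunsGo, pvS]
      · simp [pvRunsGo, if_neg h, pvSumHalves, pvS]

lemma pvGoA_eq_pvS (l : List Char) (k : Nat) : pvGoA l k = k + pvS l := by
  induction l, k using pvGoA.induct with
  | case1 c rest k ih =>
      rw [pvGoA, if_pos rfl, ih, pvS, pvRunsGo, if_pos rfl,
          show (1 : Nat) + 1 = 2 from rfl, pvSumHalves_runsGo_add_two rest c 0,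
          pvSumHalves_runsGo_zero rest c]
      omega
  | case2 c d rest k h ih =>
      simp only [pvGoA, if_neg h]
      rw [ih]
      have hdc : ¬ d = c := fun hh => h hh.symm
      simp only [pvS, pvRunsGo, if_neg hdc, pvSumHalves, List.map, List.sum_cons]
      omega
  | case3 l count h₁ =>
      -- l is [] or a singleton
      match l with
      | [] => simp [pvGoA, pvS]
      | [c] => simp [pvGoA, pvS, pvRunsGo, pvSumHalves]
      | a :: b :: t => exact absurd rfl (h₁ a b t)

lemma pvFoldB_inv (l : List Char) : ∀ (lens : List Nat) (run : Nat) (prev : Char), 0 < run →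
    pvFinB (l.foldl pvStepB (lens, run, prev)) = lens ++ pvRunsGo prev run l := by
  induction l with
  | nil => intro lens run prev h; simp [pvFinB, pvRunsGo, h]
  | cons ch rest ih =>
      intro lens run prev h
      by_cases hc : ch = prev
      · have hcond : run > 0 ∧ ch = prev := ⟨h, hc⟩
        simp only [List.foldl_cons, pvStepB, if_pos hcond]
        rw [ih lens (run + 1) prev (by omega)]
        simp [pvRunsGo, hc]
      · simp only [List.foldl_cons, pvStepB]
        rw [if_neg (by simp [hc]), if_pos h]
        rw [ih (lens ++ [run]) 1 ch (by omega)]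
        simp [pvRunsGo, hc]
  
lemma pvFoldB_top (l : List Char) :
    pvSumHalves (pvFinB (l.foldl pvStepB ([], 0, ' '))) = pvS l := by
  cases l with
  | nil => simp [pvFinB, pvS, pvSumHalves]
  | cons c rest =>
      simp only [List.foldl_cons, pvStepB]
      rw [if_neg (by simp)]
      simp only [if_neg (by omega : ¬ (0:Nat) > 0)]
      rw [pvFoldB_inv rest [] 1 c (by omega)]
      simp [pvS]

-- ===== VERDICT (by name: the statement is the Claim_ definition above) =====
theorem hasConsecutiveLetters_spec : Claim_equal_hasConsecutiveLetters := by
  intro word _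
  show _ = _
  unfold hasConsecutiveLetters hasConsecutiveLetters_alt
  rw [pvGoA_eq_pvS word.toList 0]
  have := pvFoldB_top word.toList
  unfold pvSumHalves at this
  rw [this]
  by_cases h : pvS word.toList = 3 <;> simp [h]
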